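-- pv_equiv track=rewrite | github.com/posl/comment_recommendation | script/mod_gen/3_time/zh/115_D/7.py | f
-- ===== SOURCE A (Python) =====
-- def f(n,x):
--     if n == 0:
--         return 0
--     elif x == 1:
--         return 0
--     elif x <= 1 + (2 ** n - 1) // 2:
--         return f(n - 1, x - 1)
--     elif x == 2 + (2 ** n - 1) // 2:
--         return 1 + (2 ** n - 1) // 2
--     elif x <= 2 + (2 ** n - 1):
--         return 1 + (2 ** n - 1) // 2 + f(n - 1, x - 2 - (2 ** n - 1) // 2)
--     else:
--         return 1 + 2 * (2 ** n - 1)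
-- ===== SOURCE B (Python) =====
-- def f(n, x):
--     y0 = x - 1
--     if n > 0 and y0 > 2 ** n:
--         return 2 ** (n + 1) - 1
--     y, steps = y0, 0
--     for d in range(n - 1, -1, -1):
--         m = 2 ** d
--         if y == 0 or y == m:
--             return y0 - steps
--         steps += 1
--         y -= 1 if y < m else m + 1
--     return y0 - steps - y
-- ===== Notes on version B (the rewrite author's own statement) =====
-- stated objective: alternative
-- what changed: Instead of stacking additive offsets through the recursion, B runs a subtractive descent over levels d = n-1..0 counting steps, using the invariant that offset + current_y + steps = x-1, so the answer is (x-1) - steps (minus the leftover y when the levels run out).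
-- outside the precondition, e.g. on f(-3, 3): A returns -0.75, B returns 0; on f(-1, 3): A returns 0.0, B returns 0
import Mathlib
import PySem

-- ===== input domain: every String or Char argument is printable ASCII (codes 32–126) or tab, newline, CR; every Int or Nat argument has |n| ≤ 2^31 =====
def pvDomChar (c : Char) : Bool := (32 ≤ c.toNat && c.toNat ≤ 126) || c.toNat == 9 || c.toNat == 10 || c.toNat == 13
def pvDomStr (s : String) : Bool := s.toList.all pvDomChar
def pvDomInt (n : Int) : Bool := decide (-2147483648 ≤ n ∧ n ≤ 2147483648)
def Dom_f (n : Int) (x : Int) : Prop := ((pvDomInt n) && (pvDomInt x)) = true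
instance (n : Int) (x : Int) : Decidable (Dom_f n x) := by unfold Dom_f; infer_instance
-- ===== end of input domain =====

-- B replaces A's offset-stacking recursion by a subtractive level descent that counts
-- steps and returns (x-1) - steps; same O(n) cost, different quantity maintained.

-- ===== PORT A =====
-- A recurses with n-1 at every call; the Nat fuel (n.toNat + 1) only makes the
-- recursion total in Lean and always suffices for 0 ≤ n (Pre_f).
def fA : Nat → Int → Int → Int
  | 0, _, _ => 0
  | fuel + 1, n, x =>
    if n = 0 then 0
    else if x = 1 then 0
    else if x ≤ 1 + PySem.Int.floordiv (2 ^ n.toNat - 1) 2 then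
      fA fuel (n - 1) (x - 1)
    else if x = 2 + PySem.Int.floordiv (2 ^ n.toNat - 1) 2 then
      1 + PySem.Int.floordiv (2 ^ n.toNat - 1) 2
    else if x ≤ 2 + (2 ^ n.toNat - 1) then
      1 + PySem.Int.floordiv (2 ^ n.toNat - 1) 2 +
        fA fuel (n - 1) (x - 2 - PySem.Int.floordiv (2 ^ n.toNat - 1) 2)
    else
      1 + 2 * (2 ^ n.toNat - 1)

def f (n : Int) (x : Int) : Int := fA (n.toNat + 1) n x

-- ===== PORT B =====
-- B's for-loop over d = n-1, …, 0; the Nat argument is d+1 (the number of levels left).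
def fBgo (y0 : Int) : Nat → Int → Int → Int
  | 0, y, steps => y0 - steps - y
  | d + 1, y, steps =>
    let m : Int := 2 ^ d
    if y = 0 ∨ y = m then y0 - steps
    else if y < m then fBgo y0 d (y - 1) (steps + 1)
    else fBgo y0 d (y - (m + 1)) (steps + 1)

def f_alt (n : Int) (x : Int) : Int :=
  let y0 := x - 1
  if 0 < n ∧ 2 ^ n.toNat < y0 then 2 ^ (n.toNat + 1) - 1
  else fBgo y0 n.toNat y0 0

-- ===== PRECONDITION & SPEC =====
-- Pre_f excludes n < 0, where Python's 2**n is a float: A then either raises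
-- RecursionError (x ≤ 0) or returns a float, never an int.
def Pre_f (n : Int) (x : Int) : Prop := 0 ≤ n
instance (n : Int) (x : Int) : Decidable (Pre_f n x) := by unfold Pre_f; infer_instance
def pvWitness_f : Int × Int := (3, 5)

def Spec_f (n : Int) (x : Int) (out : Int) : Prop := out = f_alt n x
instance (n : Int) (x : Int) (out : Int) : Decidable (Spec_f n x out) := by unfold Spec_f; infer_instance

-- ===== CLAIM (what is proved, stated in full; the proofs are below) =====
def Claim_equal_f : Prop := ∀ (n : Int) (x : Int), Dom_f n x → Pre_f n x → Spec_f n x (f n x)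

-- ===== LEMMAS AND PROOFS =====

theorem floordiv_pow (d : Nat) : PySem.Int.floordiv (2 ^ (d + 1) - 1) 2 = 2 ^ d - 1 := by
  rw [PySem.Int.floordiv_eq_ediv_of_pos (by norm_num)]
  have h2 : (2 : Int) ^ (d + 1) = 2 ^ d * 2 := pow_succ 2 d
  omega

-- One-step unfoldings (used instead of `simp [fA]`, which would unfold nested calls too).
theorem fA_step (fuel : Nat) (n x : Int) :
    fA (fuel + 1) n x =
      if n = 0 then 0
      else if x = 1 then 0
      else if x ≤ 1 + PySem.Int.floordiv (2 ^ n.toNat - 1) 2 then fA fuel (n - 1) (x - 1)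
      else if x = 2 + PySem.Int.floordiv (2 ^ n.toNat - 1) 2 then
        1 + PySem.Int.floordiv (2 ^ n.toNat - 1) 2
      else if x ≤ 2 + (2 ^ n.toNat - 1) then
        1 + PySem.Int.floordiv (2 ^ n.toNat - 1) 2 +
          fA fuel (n - 1) (x - 2 - PySem.Int.floordiv (2 ^ n.toNat - 1) 2)
      else 1 + 2 * (2 ^ n.toNat - 1) := rfl

theorem fBgo_step (y0 : Int) (d : Nat) (y steps : Int) :
    fBgo y0 (d + 1) y steps =
      if y = 0 ∨ y = 2 ^ d then y0 - steps
      else if y < 2 ^ d then fBgo y0 d (y - 1) (steps + 1)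
      else fBgo y0 d (y - (2 ^ d + 1)) (steps + 1) := rfl

-- Core invariant: on y ≤ 2^d, B's descent equals (y0 - steps - y) plus A's value at level d.
theorem fBgo_eq (d : Nat) : ∀ (y0 y steps : Int), y ≤ 2 ^ d →
    fBgo y0 d y steps = (y0 - steps - y) + fA (d + 1) (d : Int) (y + 1) := by
  induction d with
  | zero => intro y0 y steps _; simp [fBgo, fA]
  | succ k ih =>
    intro y0 y steps hy
    have hm : (0 : Int) < 2 ^ k := by positivity
    have h2 : (2 : Int) ^ (k + 1) = 2 ^ k * 2 := pow_succ 2 k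
    have hn0 : ((k : Int) + 1) ≠ 0 := by omega
    have hcast : ((k : Int) + 1).toNat = k + 1 := by omega
    have hsub : ((k : Int) + 1) - 1 = (k : Int) := by ring
    rw [fBgo_step, fA_step]
    simp only [Nat.cast_succ, hcast, floordiv_pow, hsub, if_neg hn0]
    by_cases h0 : y = 0
    · simp [h0]
    by_cases hmid : y = 2 ^ k
    · rw [if_pos (Or.inr hmid), if_neg (by omega : ¬ y + 1 = 1),
        if_neg (by omega : ¬ y + 1 ≤ 1 + (2 ^ k - 1)),
        if_pos (by omega : y + 1 = 2 + (2 ^ k - 1))]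
      omega
    rw [if_neg (by tauto : ¬ (y = 0 ∨ y = 2 ^ k)), if_neg (by omega : ¬ y + 1 = 1)]
    by_cases hlt : y < 2 ^ k
    · rw [if_pos hlt, if_pos (by omega : y + 1 ≤ 1 + (2 ^ k - 1)),
        ih y0 (y - 1) (steps + 1) (by omega),
        (by ring : y - 1 + 1 = y)]
      ring
    · rw [if_neg hlt, if_neg (by omega : ¬ y + 1 ≤ 1 + (2 ^ k - 1)),
        if_neg (by omega : ¬ y + 1 = 2 + (2 ^ k - 1)),
        if_pos (by omega : y + 1 ≤ 2 + (2 ^ (k + 1) - 1)),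
        ih y0 (y - (2 ^ k + 1)) (steps + 1) (by omega),
        (by ring : y - (2 ^ k + 1) + 1 = y + 1 - 2 - (2 ^ k - 1))]
      ring

-- ===== VERDICT (by name: the statement is the Claim_ definition above) =====
theorem f_spec : Claim_equal_f := by
  intro n x _ hn
  replace hn : 0 ≤ n := hn
  unfold Spec_f f f_alt
  simp only []
  by_cases hg : 0 < n ∧ 2 ^ n.toNat < x - 1
  · -- top-level out-of-range input: A takes its final else branch
    obtain ⟨hpos, hbig⟩ := hg
    rw [if_pos ⟨hpos, hbig⟩]
    obtain ⟨k, hk⟩ : ∃ k : Nat, n.toNat = k + 1 := ⟨n.toNat - 1, by omega⟩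
    rw [hk] at hbig
    have hm : (0 : Int) < 2 ^ k := by positivity
    have h2 : (2 : Int) ^ (k + 1) = 2 ^ k * 2 := pow_succ 2 k
    have h3 : (2 : Int) ^ (k + 1 + 1) = 2 ^ (k + 1) * 2 := pow_succ 2 (k + 1)
    rw [fA_step]
    simp only [hk, floordiv_pow]
    rw [if_neg (by omega : ¬ n = 0), if_neg (by omega : ¬ x = 1),
      if_neg (by omega : ¬ x ≤ 1 + (2 ^ k - 1)), if_neg (by omega : ¬ x = 2 + (2 ^ k - 1)),
      if_neg (by omega : ¬ x ≤ 2 + (2 ^ (k + 1) - 1))]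
    omega
  · rw [if_neg hg]
    by_cases hz : n = 0
    · subst hz; simp [fBgo, fA]
    · have hy : x - 1 ≤ 2 ^ n.toNat := by
        rcases not_and_or.mp hg with h | h
        · omega
        · omega
      rw [fBgo_eq n.toNat (x - 1) (x - 1) 0 hy, (by omega : ((n.toNat : Int)) = n),
        (by ring : x - 1 + 1 = x)]
      ring
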